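-- pv_equiv track=rewrite | github.com/zalak0/Cerebral_Palsy | Python similation/talk.py | _runs_from_mask
-- ===== SOURCE A (Python) =====
-- def _runs_from_mask(mask):
--     """返回 mask=True 的连续段列表 [(s,e), ...]，e为开区间"""
--     runs = []
--     i = 0
--     N = len(mask)
--     while i < N:
--         if not mask[i]:
--             i += 1
--             continue
--         s = i
--         while i < N and mask[i]:
--             i += 1
--         e = i
--         runs.append((s, e))
--     return runs
-- ===== SOURCE B (Python) =====
-- def _runs_from_mask(mask):
--     """返回 mask=True 的连续段列表 [(s,e), ...]，e为开区间"""
--     N = len(mask)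
--     starts = [i for i in range(N) if mask[i] and (i == 0 or not mask[i - 1])]
--     ends = [i + 1 for i in range(N) if mask[i] and (i == N - 1 or not mask[i + 1])]
--     return list(zip(starts, ends))
-- ===== Notes on version B (the rewrite author's own statement) =====
-- stated objective: idiomatic
-- what changed: Replaces the nested run-consuming while loops with edge detection: two comprehensions collect rising-edge start indices and falling-edge end indices, which are then zipped into (s,e) pairs.
import Mathlib
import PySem

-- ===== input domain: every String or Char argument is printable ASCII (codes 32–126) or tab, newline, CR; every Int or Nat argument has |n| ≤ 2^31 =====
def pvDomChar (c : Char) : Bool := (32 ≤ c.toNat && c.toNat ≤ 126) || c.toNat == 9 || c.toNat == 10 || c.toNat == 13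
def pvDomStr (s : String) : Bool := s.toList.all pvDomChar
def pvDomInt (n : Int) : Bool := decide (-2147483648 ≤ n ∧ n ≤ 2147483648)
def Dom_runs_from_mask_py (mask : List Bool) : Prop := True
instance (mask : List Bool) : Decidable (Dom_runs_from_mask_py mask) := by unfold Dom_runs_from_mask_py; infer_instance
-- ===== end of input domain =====

-- B replaces A's nested run-consuming while loops by edge detection: two comprehensions
-- collect run starts (rising edges) and run ends (falling edges) and zip them (objective: idiomatic).

-- ===== PORT A =====
-- inner `while i < N and mask[i]: i += 1` of A, as a function from i to the final i
def pvConsume (mask : List Bool) (i : Nat) : Nat :=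
  if h : i < mask.length ∧ mask.getD i false then pvConsume mask (i + 1) else i
termination_by mask.length - i
decreasing_by omega

theorem pvConsume_ge (mask : List Bool) (i : Nat) : i ≤ pvConsume mask i := by
  unfold pvConsume
  split
  · have := pvConsume_ge mask (i + 1); omega
  · exact le_refl i
termination_by mask.length - i
decreasing_by rename_i h; omega

theorem pvConsume_true (mask : List Bool) (i : Nat) (h1 : i < mask.length)
    (h2 : mask.getD i false = true) : pvConsume mask i = pvConsume mask (i + 1) := by
  rw [pvConsume, dif_pos ⟨h1, by rwa [List.getD_eq_getElem?_getD] at h2⟩]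

-- outer while loop of A, state (runs, i)
def pvRunsA (mask : List Bool) (runs : List (Int × Int)) (i : Nat) : List (Int × Int) :=
  if h : i < mask.length then
    if hb : mask.getD i false = false then pvRunsA mask runs (i + 1)
    else
      let s := i
      let e := pvConsume mask i
      pvRunsA mask (runs ++ [((s : Int), (e : Int))]) e
  else runs
termination_by mask.length - i
decreasing_by
  · omega
  · have h1 : pvConsume mask i = pvConsume mask (i + 1) :=
      pvConsume_true mask i h (by simpa using hb)
    have h2 := pvConsume_ge mask (i + 1)
    simp only [e, h1]; omega

def runs_from_mask_py (mask : List Bool) : List (Int × Int) :=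
  pvRunsA mask [] 0

-- ===== PORT B =====
def runs_from_mask_py_alt (mask : List Bool) : List (Int × Int) :=
  let N : Int := mask.length
  let starts : List Int := (PySem.List.pyRange 0 N 1).filter (fun i =>
    PySem.List.pyGetD mask i false &&
      (decide (i = 0) || !(PySem.List.pyGetD mask (i - 1) false)))
  let ends : List Int := ((PySem.List.pyRange 0 N 1).filter (fun i =>
    PySem.List.pyGetD mask i false &&
      (decide (i = N - 1) || !(PySem.List.pyGetD mask (i + 1) false)))).map (fun i => i + 1)
  starts.zip ends

-- ===== PRECONDITION & SPEC =====
def Spec_runs_from_mask_py (mask : List Bool) (out : List (Int × Int)) : Prop := out = runs_from_mask_py_alt mask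
instance (mask : List Bool) (out : List (Int × Int)) : Decidable (Spec_runs_from_mask_py mask out) := by unfold Spec_runs_from_mask_py; infer_instance

-- ===== CLAIM (what is proved, stated in full; the proofs are below) =====
def Claim_equal_runs_from_mask_py : Prop := ∀ (mask : List Bool), Dom_runs_from_mask_py mask → Spec_runs_from_mask_py mask (runs_from_mask_py mask)

-- ===== LEMMAS AND PROOFS =====

-- length of the leading run of `true`s
def pvFe : List Bool → Nat
  | [] => 0
  | true :: t => pvFe t + 1
  | false :: _ => 0

-- relative start indices of runs; `p` = value of the element just before the window
def pvS : Bool → List Bool → List Nat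
  | _, [] => []
  | p, b :: t => (if b && !p then [0] else []) ++ (pvS b t).map (· + 1)

-- relative (open) end indices of runs
def pvE : List Bool → List Nat
  | [] => []
  | b :: t => (if b && !(t.getD 0 false) then [1] else []) ++ (pvE t).map (· + 1)

-- single-pass run collector: absolute offset k, open-run start s
def pvGo : List Bool → Nat → Option Nat → List (Nat × Nat)
  | [], _, none => []
  | [], k, some s => [(s, k)]
  | true :: t, k, none => pvGo t (k + 1) (some k)
  | true :: t, k, some s => pvGo t (k + 1) (some s)
  | false :: t, k, none => pvGo t (k + 1) none
  | false :: t, k, some s => (s, k) :: pvGo t (k + 1) none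

-- generalized start filter (Nat level); p = element just before the window
def pvSFg (p : Bool) (m : List Bool) : List Nat :=
  (List.range m.length).filter (fun i => m.getD i false && !(if i = 0 then p else m.getD (i - 1) false))

def pvEF (m : List Bool) : List Nat :=
  (List.range m.length).filter (fun i => m.getD i false && !(m.getD (i + 1) false))

theorem pvConsume_stop (mask : List Bool) (i : Nat)
    (h : ¬(i < mask.length ∧ mask.getD i false = true)) : pvConsume mask i = i := by
  rw [pvConsume, dif_neg (by rwa [List.getD_eq_getElem?_getD] at h)]

theorem pvFe_zero (t : List Bool) (h : t.getD 0 false = false) : pvFe t = 0 := by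
  cases t with
  | nil => rfl
  | cons b t => cases b with
    | false => rfl
    | true => simp at h

theorem pvS_drop (t : List Bool) :
    pvS true t = (pvS false (t.drop (pvFe t))).map (· + pvFe t) := by
  induction t with
  | nil => simp [pvS, pvFe]
  | cons b t ih =>
    cases b with
    | false => simp [pvS, pvFe]
    | true =>
      rw [pvS, pvFe, ih]
      simp [List.map_map]

theorem pvE_drop (t : List Bool) :
    pvE t = (if t.getD 0 false then [pvFe t] else []) ++ (pvE (t.drop (pvFe t))).map (· + pvFe t) := by
  induction t with
  | nil => simp [pvE, pvFe]
  | cons b t ih =>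
    cases b with
    | false => simp [pvE, pvFe]
    | true =>
      cases ht : t.getD 0 false with
      | false =>
        have hf := pvFe_zero t ht
        rw [List.getD_eq_getElem?_getD] at ht
        simp [pvE, pvFe, ht, hf]
      | true =>
        rw [pvE, ih, pvFe]
        have ht' := ht
        rw [List.getD_eq_getElem?_getD] at ht'
        simp [ht', List.map_map]

theorem pvGo_both (m : List Bool) :
    (∀ k, pvGo m k none = ((pvS false m).zip (pvE m)).map (fun p => (p.1 + k, p.2 + k))) ∧
    (∀ k s, pvGo m k (some s) = (s, k + pvFe m) ::
      ((pvS false (m.drop (pvFe m))).zip (pvE (m.drop (pvFe m)))).map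
        (fun p => (p.1 + (k + pvFe m), p.2 + (k + pvFe m)))) := by
  induction m with
  | nil =>
    constructor
    · intro k; simp [pvGo, pvS, pvE]
    · intro k s; simp [pvGo, pvS, pvE, pvFe]
  | cons b t ih =>
    obtain ⟨ih1, ih2⟩ := ih
    cases b with
    | false =>
      constructor
      · intro k
        rw [pvGo, ih1, pvS, pvE]
        simp [List.zip_map, List.map_map]
        intro a b _; omega
      · intro k s
        rw [pvGo, ih1]
        simp only [pvFe, List.drop_zero, pvS, pvE]
        simp [List.zip_map, List.map_map]
        intro a b _; omega
    | true =>
      have key : ∀ k, pvGo (true :: t) k none = pvGo t (k+1) (some k) := fun _ => rfl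
      constructor
      · intro k
        rw [key, ih2 (k+1) k]
        -- RHS side: unfold pvS false (true::t) and pvE (true::t) via drop lemmas
        rw [show pvS false (true :: t) = 0 :: (pvS true t).map (· + 1) by simp [pvS]]
        rw [pvS_drop t, pvE_drop (true :: t)]
        simp only [List.getD_cons_zero, if_pos rfl, pvFe, List.drop_succ_cons]
        simp [List.zip_map, List.map_map]
        constructor
        · omega
        · intro a b _; omega
      · intro k s
        rw [pvGo, ih2]
        simp only [pvFe, List.drop_succ_cons]
        have h : k + 1 + pvFe t = k + (pvFe t + 1) := by omega
        rw [h]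

theorem pvGo_drop_some (m : List Bool) (j s : Nat) :
    pvGo (m.drop j) j (some s) =
      (s, pvConsume m j) :: pvGo (m.drop (pvConsume m j)) (pvConsume m j) none := by
  by_cases hj : j < m.length
  · rw [List.drop_eq_getElem_cons hj]
    cases hm : m[j] with
    | true =>
      have hg : m.getD j false = true := by rw [List.getD_eq_getElem m false hj, hm]
      rw [pvConsume_true m j hj hg]
      show pvGo (m.drop (j+1)) (j+1) (some s) = _
      exact pvGo_drop_some m (j + 1) s
    | false =>
      have hg : m.getD j false = false := by rw [List.getD_eq_getElem m false hj, hm]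
      have hc : pvConsume m j = j := pvConsume_stop m j (by rintro ⟨-, hh⟩; rw [hg] at hh; cases hh)
      rw [hc]
      show (s, j) :: pvGo (m.drop (j+1)) (j+1) none = _
      rw [List.drop_eq_getElem_cons hj, hm]
      rfl
  · have hd : m.drop j = [] := List.drop_eq_nil_of_le (by omega)
    have hc : pvConsume m j = j := pvConsume_stop m j (by omega)
    rw [hd, hc, hd]
    rfl
termination_by m.length - j
decreasing_by omega

theorem pvRunsA_eq (m : List Bool) (acc : List (Int × Int)) (i : Nat) :
    pvRunsA m acc i = acc ++ (pvGo (m.drop i) i none).map (fun p => ((p.1 : Int), (p.2 : Int))) := by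
  rw [pvRunsA]
  by_cases hi : i < m.length
  · rw [dif_pos hi]
    by_cases hb : m.getD i false = false
    · rw [dif_pos hb]
      rw [pvRunsA_eq m acc (i + 1)]
      congr 1
      rw [List.drop_eq_getElem_cons hi,
        show m[i] = false by rw [List.getD_eq_getElem m false hi] at hb; exact hb]
      rfl
    · rw [dif_neg hb]
      have hbt : m.getD i false = true := by simpa using hb
      have he1 : pvConsume m i = pvConsume m (i + 1) := pvConsume_true m i hi hbt
      have he2 : i + 1 ≤ pvConsume m (i + 1) := pvConsume_ge m (i + 1)
      rw [pvRunsA_eq m _ (pvConsume m i)]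
      have hgo : pvGo (m.drop i) i none = pvGo (m.drop (i+1)) (i+1) (some i) := by
        rw [List.drop_eq_getElem_cons hi,
          show m[i] = true by rw [List.getD_eq_getElem m false hi] at hbt; exact hbt]
        rfl
      rw [hgo, he1, pvGo_drop_some m (i+1) i, ← he1]
      simp
  · rw [dif_neg hi]
    rw [List.drop_eq_nil_of_le (by omega)]
    simp [pvGo]
termination_by m.length - i
decreasing_by all_goals omega

theorem pvSFg_eq (p : Bool) (m : List Bool) : pvSFg p m = pvS p m := by
  induction m generalizing p with
  | nil => rfl
  | cons b t ih =>
    rw [pvSFg, pvS, List.length_cons, List.range_succ_eq_map, List.filter_cons, List.filter_map]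
    have hpred : ((fun i => (b :: t).getD i false && !(if i = 0 then p else (b :: t).getD (i - 1) false)) ∘ Nat.succ)
        = (fun i => t.getD i false && !(if i = 0 then b else t.getD (i - 1) false)) := by
      funext i
      cases i with
      | zero => simp
      | succ j => simp
    rw [hpred, ← pvSFg, ih]
    cases b with
    | false => simp
    | true => cases p with
      | false => simp
      | true => simp

theorem pvEF_eq (m : List Bool) : (pvEF m).map (· + 1) = pvE m := by
  induction m with
  | nil => rfl
  | cons b t ih =>
    rw [pvEF, pvE, List.length_cons, List.range_succ_eq_map, List.filter_cons, List.filter_map]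
    have hpred : ((fun i => (b :: t).getD i false && !((b :: t).getD (i + 1) false)) ∘ Nat.succ)
        = (fun i => t.getD i false && !(t.getD (i + 1) false)) := by
      funext i; simp
    rw [hpred, ← pvEF]
    cases hb : (b && !(t.getD 0 false)) with
    | false =>
      rw [List.getD_eq_getElem?_getD] at hb
      simp [hb, ← ih, List.map_map]
    | true =>
      rw [List.getD_eq_getElem?_getD] at hb
      simp only [Bool.and_eq_true, Bool.not_eq_true'] at hb
      simp [hb.1, hb.2, ← ih, List.map_map]

theorem alt_eq (m : List Bool) :
    runs_from_mask_py_alt m =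
      ((pvS false m).zip (pvE m)).map (fun p => ((p.1 : Int), (p.2 : Int))) := by
  rw [runs_from_mask_py_alt]
  simp only [PySem.List.pyRange_zero_natCast, List.filter_map]
  have hS : (List.range m.length).filter
      ((fun i => PySem.List.pyGetD m i false &&
        (decide (i = 0) || !(PySem.List.pyGetD m (i - 1) false))) ∘ (fun k : Nat => (k : Int)))
      = pvS false m := by
    rw [← pvSFg_eq false m, pvSFg]
    apply List.filter_congr
    intro j hj
    simp only [Function.comp_apply]
    cases j with
    | zero => simp [PySem.List.pyGetD_zero]
    | succ j' =>
      have h1 : ((j' + 1 : Nat) : Int) - 1 = (j' : Int) := by push_cast; ring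
      have h2 : ¬(((j' + 1 : Nat) : Int) = 0) := by push_cast; omega
      rw [h1, PySem.List.pyGetD_natCast, PySem.List.pyGetD_natCast]
      have h3 : ¬((j' : Int) + 1 = 0) := by omega
      simp [h3]
  have hE : (List.range m.length).filter
      ((fun i => PySem.List.pyGetD m i false &&
        (decide (i = (m.length : Int) - 1) || !(PySem.List.pyGetD m (i + 1) false))) ∘ (fun k : Nat => (k : Int)))
      = pvEF m := by
    rw [pvEF]
    apply List.filter_congr
    intro j hj
    rw [List.mem_range] at hj
    simp only [Function.comp_apply]
    have h1 : ((j : Nat) : Int) + 1 = ((j + 1 : Nat) : Int) := by push_cast; ring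
    rw [h1]
    by_cases hlast : j = m.length - 1
    · have hd : ¬(j + 1 < m.length) := by omega
      have hgd : m.getD (j + 1) false = false := List.getD_eq_default m false (by omega)
      have hq : ((j : Nat) : Int) = (m.length : Int) - 1 := by push_cast; omega
      rw [PySem.List.pyGetD_natCast, PySem.List.pyGetD_natCast, hgd]
      simp [hq]
    · have hq : ¬(((j : Nat) : Int) = (m.length : Int) - 1) := by push_cast; omega
      rw [PySem.List.pyGetD_natCast, PySem.List.pyGetD_natCast]
      simp [hq]
  rw [hS, hE, ← pvEF_eq]
  rw [show (fun i : Int => i + 1) = (fun i => i + 1) from rfl]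
  rw [List.map_map, show ((fun i : Int => i + 1) ∘ (fun k : Nat => (k : Int)))
    = ((fun k : Nat => (k : Int)) ∘ (fun k : Nat => k + 1)) by funext k; simp]
  rw [← List.map_map, List.zip_map]
  simp [Prod.map]

-- ===== VERDICT (by name: the statement is the Claim_ definition above) =====
theorem runs_from_mask_py_spec : Claim_equal_runs_from_mask_py := by
  intro mask _
  show runs_from_mask_py mask = runs_from_mask_py_alt mask
  rw [runs_from_mask_py, pvRunsA_eq, alt_eq, List.drop_zero, (pvGo_both mask).1 0]
  simp [List.map_map]
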